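-- pv_equiv track=rewrite | github.com/MrBrantCode/unitest_baseline | mut_generate/mist_train_cf/cf_51849/solution.py | check_sequences
-- ===== SOURCE A (Python) =====
-- from collections import Counter
-- from math import factorial
--
-- def check_sequences(seq1, seq2):
--     # Count characters
--     counts1 = Counter(seq1)
--     counts2 = Counter(seq2)
--
--     # Check if character counts match
--     are_anagrams = counts1 == counts2
--
--     # Calculate factorial of length
--     total1 = factorial(sum(counts1.values()))
--     total2 = factorial(sum(counts2.values()))
--
--     # Divide by factorials of individual character counts
--     for count in counts1.values():
--         total1 //= factorial(count)
--     for count in counts2.values():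
--         total2 //= factorial(count)
--
--     return (are_anagrams, total1, total2)
-- ===== SOURCE B (Python) =====
-- from collections import Counter
-- from math import comb
--
-- def check_sequences(seq1, seq2):
--     counts1 = Counter(seq1)
--     counts2 = Counter(seq2)
--
--     are_anagrams = counts1 == counts2
--
--     def arrangements(counts):
--         result = 1
--         running = 0
--         for count in counts.values():
--             result *= comb(running + count, count)
--             running += count
--         return result
--
--     return (are_anagrams, arrangements(counts1), arrangements(counts2))
-- ===== Notes on version B (the rewrite author's own statement) =====
-- stated objective: faster
-- what changed: Each permutation count is computed incrementally as a product of binomial coefficients (result *= comb(running+count, count); running += count) instead of forming factorial(n) and repeatedly floor-dividing it by each count's factorial; the anagram check stays Counter equality.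
import Mathlib
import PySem

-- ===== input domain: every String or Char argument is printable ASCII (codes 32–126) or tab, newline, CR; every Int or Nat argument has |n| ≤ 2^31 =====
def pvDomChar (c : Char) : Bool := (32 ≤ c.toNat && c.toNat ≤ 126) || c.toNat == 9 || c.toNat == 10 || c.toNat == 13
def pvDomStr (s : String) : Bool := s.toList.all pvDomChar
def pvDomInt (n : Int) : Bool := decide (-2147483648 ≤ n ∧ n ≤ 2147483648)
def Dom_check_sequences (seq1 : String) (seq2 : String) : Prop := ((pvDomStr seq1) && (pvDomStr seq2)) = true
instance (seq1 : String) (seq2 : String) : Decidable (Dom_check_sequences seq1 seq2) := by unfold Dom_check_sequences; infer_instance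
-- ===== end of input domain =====

-- B computes each permutation count incrementally as a product of binomial coefficients
-- over the same character counts, instead of A's factorial(n) followed by repeated
-- floor-divisions (alternative decomposition; the anagram check stays Counter equality).

-- ===== PORT A =====
-- math.factorial(n); exact for 0 ≤ n, which is the only way A calls it (counts and sums of counts)
def pyFactorial (n : Int) : Int := (Nat.factorial n.toNat : Int)

-- Python's dict ==: same key set and the same value at every key (insertion order ignored)
def pyDictEq (d1 d2 : PySem.Dict Char Int) : Bool :=
  PySem.Set.equal d1.keys d2.keys && d1.keys.all (fun k => d1.get? k == d2.get? k)

def check_sequences (seq1 : String) (seq2 : String) : Bool × Int × Int :=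
  let counts1 := PySem.Dict.counter seq1.toList
  let counts2 := PySem.Dict.counter seq2.toList
  let are_anagrams := pyDictEq counts1 counts2
  let total1 := pyFactorial (PySem.Dict.values counts1).sum
  let total2 := pyFactorial (PySem.Dict.values counts2).sum
  let total1 := (PySem.Dict.values counts1).foldl
    (fun t count => PySem.Int.floordiv t (pyFactorial count)) total1
  let total2 := (PySem.Dict.values counts2).foldl
    (fun t count => PySem.Int.floordiv t (pyFactorial count)) total2
  (are_anagrams, total1, total2)

-- ===== PORT B =====
-- math.comb(n, k); exact for 0 ≤ n, 0 ≤ k, which is the only way B calls it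
def pyComb (n k : Int) : Int := (Nat.choose n.toNat k.toNat : Int)

-- the inner helper 'arrangements(counts)' of Source B: result *= comb(running + count, count); running += count
def arrangements (counts : PySem.Dict Char Int) : Int :=
  ((PySem.Dict.values counts).foldl
    (fun (p : Int × Int) count => (p.1 * pyComb (p.2 + count) count, p.2 + count)) (1, 0)).1

def check_sequences_alt (seq1 : String) (seq2 : String) : Bool × Int × Int :=
  let counts1 := PySem.Dict.counter seq1.toList
  let counts2 := PySem.Dict.counter seq2.toList
  let are_anagrams := pyDictEq counts1 counts2
  (are_anagrams, arrangements counts1, arrangements counts2)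

-- ===== PRECONDITION & SPEC =====
def Spec_check_sequences (seq1 : String) (seq2 : String) (out : Bool × Int × Int) : Prop := out = check_sequences_alt seq1 seq2
instance (seq1 : String) (seq2 : String) (out : Bool × Int × Int) : Decidable (Spec_check_sequences seq1 seq2 out) := by unfold Spec_check_sequences; infer_instance

-- ===== CLAIM (what is proved, stated in full; the proofs are below) =====
def Claim_equal_check_sequences : Prop := ∀ (seq1 : String) (seq2 : String), Dom_check_sequences seq1 seq2 → Spec_check_sequences seq1 seq2 (check_sequences seq1 seq2)

-- ===== LEMMAS AND PROOFS =====

-- B's loop body at the Nat level (proof-local name; the ports do not use it)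
def bstep (p : Nat × Nat) (c : Nat) : Nat × Nat := (p.1 * (p.2 + c).choose c, p.2 + c)

-- B's fold, multiplicatively: second component is r + sum, and
-- result * ∏ c! * r! = x * (r + sum)!  (the multinomial-as-binomial-product identity)
theorem binom_fold_mul (ns : List Nat) (x r : Nat) :
    (ns.foldl bstep (x, r)).2 = r + ns.sum ∧
    (ns.foldl bstep (x, r)).1 * (ns.map Nat.factorial).prod * Nat.factorial r
      = x * Nat.factorial (r + ns.sum) := by
  induction ns generalizing x r with
  | nil => simp
  | cons c t ih =>
    obtain ⟨h2, h1⟩ := ih (x * (r + c).choose c) (r + c)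
    have hfold : (c :: t).foldl bstep (x, r) = t.foldl bstep (x * (r + c).choose c, r + c) := rfl
    have hkey : (r + c).choose c * Nat.factorial c * Nat.factorial r = Nat.factorial (r + c) := by
      simpa using Nat.choose_mul_factorial_mul_factorial (Nat.le_add_left c r)
    rw [hfold]
    generalize hF : t.foldl bstep (x * (r + c).choose c, r + c) = F at h1 h2
    refine ⟨by simpa [add_assoc] using h2, ?_⟩
    apply Nat.eq_of_mul_eq_mul_right (Nat.factorial_pos (r + c))
    have e1 : F.1 * ((c :: t).map Nat.factorial).prod * Nat.factorial r * Nat.factorial (r + c)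
        = (F.1 * (t.map Nat.factorial).prod * Nat.factorial (r + c)) * (Nat.factorial c * Nat.factorial r) := by
      simp only [List.map_cons, List.prod_cons]; ring
    rw [e1, h1]
    calc x * (r + c).choose c * Nat.factorial (r + c + t.sum) * (Nat.factorial c * Nat.factorial r)
        = x * Nat.factorial (r + c + t.sum) * ((r + c).choose c * Nat.factorial c * Nat.factorial r) := by ring
      _ = x * Nat.factorial (r + (c :: t).sum) * Nat.factorial (r + c) := by
          rw [hkey]; simp [List.sum_cons, add_assoc]

-- A's loop at the Nat level: successive exact floor-divisions collapse to one division
theorem div_fold (ns : List Nat) (N : Nat) (h : (ns.map Nat.factorial).prod ∣ N) :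
    ns.foldl (fun t c => t / Nat.factorial c) N = N / (ns.map Nat.factorial).prod := by
  induction ns generalizing N with
  | nil => simp
  | cons c t ih =>
    simp only [List.map_cons, List.prod_cons] at h
    have hdvd : (t.map Nat.factorial).prod ∣ N / Nat.factorial c := Nat.dvd_div_of_mul_dvd h
    simp only [List.foldl_cons, List.map_cons, List.prod_cons]
    rw [ih (N / Nat.factorial c) hdvd, Nat.div_div_eq_div_mul]

-- the two Nat-level loops agree when A starts from (sum ns)!
theorem nat_loops_agree (ns : List Nat) :
    ns.foldl (fun t c => t / Nat.factorial c) (Nat.factorial ns.sum)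
      = (ns.foldl bstep (1, 0)).1 := by
  obtain ⟨-, h1⟩ := binom_fold_mul ns 1 0
  simp only [Nat.factorial_zero, mul_one, one_mul, Nat.zero_add] at h1
  have hdvd : (ns.map Nat.factorial).prod ∣ Nat.factorial ns.sum := Dvd.intro_left _ h1
  rw [div_fold ns _ hdvd]
  have hpos : 0 < (ns.map Nat.factorial).prod :=
    List.prod_pos (by intro x hx; obtain ⟨c, -, rfl⟩ := List.mem_map.mp hx; exact Nat.factorial_pos c)
  exact Nat.div_eq_of_eq_mul_left hpos (by rw [← h1])

-- casting A's Int fold down to the Nat fold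
theorem int_div_fold (ns : List Nat) (N : Nat) :
    (ns.map (Nat.cast : Nat → Int)).foldl (fun t count => PySem.Int.floordiv t (pyFactorial count)) (N : Int)
      = ((ns.foldl (fun t c => t / Nat.factorial c) N : Nat) : Int) := by
  induction ns generalizing N with
  | nil => simp
  | cons c t ih =>
    simp only [List.map_cons, List.foldl_cons]
    have : PySem.Int.floordiv (N : Int) (pyFactorial (c : Int)) = ((N / Nat.factorial c : Nat) : Int) := by
      simp [pyFactorial, PySem.Int.floordiv_natCast]
    rw [this, ih]

-- casting B's Int fold down to the Nat fold
theorem int_binom_fold (ns : List Nat) (x r : Nat) :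
    (ns.map (Nat.cast : Nat → Int)).foldl
        (fun (p : Int × Int) count => (p.1 * pyComb (p.2 + count) count, p.2 + count)) ((x : Int), (r : Int))
      = (((ns.foldl bstep (x, r)).1 : Int), ((ns.foldl bstep (x, r)).2 : Int)) := by
  induction ns generalizing x r with
  | nil => simp
  | cons c t ih =>
    simp only [List.map_cons, List.foldl_cons]
    have hstep : ((x : Int) * pyComb ((r : Int) + (c : Int)) (c : Int), (r : Int) + (c : Int))
        = (((x * (r + c).choose c : Nat) : Int), ((r + c : Nat) : Int)) := by
      have ht : ((r : Int) + (c : Int)).toNat = r + c := by omega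
      have hc : ((c : Int)).toNat = c := by omega
      simp only [pyComb, ht, hc]
      push_cast
      ring
    rw [hstep, ih]
    rfl

-- the values of a counter are the casts of a list of Nats
theorem counter_values_cast (xs : List Char) :
    PySem.Dict.values (PySem.Dict.counter xs)
      = ((PySem.Set.ofList xs).map (fun k => xs.count k)).map (Nat.cast : Nat → Int) := by
  simp [PySem.Dict.values, PySem.Dict.items_counter, List.map_map]

-- the whole Nat-level agreement, lifted to the Int folds the ports run
theorem total_eq_arr_ns (ns : List Nat) :
    (ns.map (Nat.cast : Nat → Int)).foldl (fun t count => PySem.Int.floordiv t (pyFactorial count))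
        (pyFactorial (ns.map (Nat.cast : Nat → Int)).sum)
      = ((ns.map (Nat.cast : Nat → Int)).foldl
          (fun (p : Int × Int) count => (p.1 * pyComb (p.2 + count) count, p.2 + count)) (1, 0)).1 := by
  have hsum : ((ns.map (Nat.cast : Nat → Int)).sum) = ((ns.sum : Nat) : Int) := by simp
  have hfact : ∀ m : Nat, pyFactorial ((m : Nat) : Int) = ((Nat.factorial m : Nat) : Int) := by
    intro m; simp [pyFactorial]
  rw [hsum, hfact ns.sum, int_div_fold, nat_loops_agree]
  have h := int_binom_fold ns 1 0
  norm_num at h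
  rw [h]

-- one side of the result: A's total equals B's arrangements, for any string
theorem total_eq_arrangements (xs : List Char) :
    (PySem.Dict.values (PySem.Dict.counter xs)).foldl
        (fun t count => PySem.Int.floordiv t (pyFactorial count))
        (pyFactorial (PySem.Dict.values (PySem.Dict.counter xs)).sum)
      = arrangements (PySem.Dict.counter xs) := by
  rw [arrangements, counter_values_cast]
  exact total_eq_arr_ns _

-- ===== VERDICT (by name: the statement is the Claim_ definition above) =====
theorem check_sequences_spec : Claim_equal_check_sequences := by
  intro seq1 seq2 _
  show check_sequences seq1 seq2 = check_sequences_alt seq1 seq2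
  simp only [check_sequences, check_sequences_alt]
  rw [total_eq_arrangements seq1.toList, total_eq_arrangements seq2.toList]
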